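-- pv_equiv track=rewrite | github.com/sheryllan/Algo | DoublePointers/biological_hazard/biological_hazard.py | bioHazard
-- ===== SOURCE A (Python) =====
-- def bioHazard(n, allergic, poisonous):
--     # Build conflict pairs: for each bacteria x, list of bacteria it conflicts with
--     # A conflict exists between p and a: they can't coexist
--     from collections import defaultdict
--
--     # For each value, store positions (1-indexed)
--     # conflicts[x] = list of y where (x,y) or (y,x) is a poisonous pair
--     conflicts = defaultdict(list)
--
--     for a, p in zip(allergic, poisonous):
--         # p is poisonous to a — they can't be in the same interval
--         conflicts[p].append(a)
--         conflicts[a].append(p)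
--
--     # Sliding window: for each r, maintain min valid left boundary
--     # pos[bacteria] = its position (bacteria are 1-indexed, positions 1..n)
--     # Here bacteria labels ARE their positions (1 to n)
--
--     count = 0
--     min_l = 1  # minimum left boundary (1-indexed)
--
--     for r in range(1, n + 1):
--         # When we include bacteria r, check all its conflict partners
--         for partner in conflicts[r]:
--             if partner < r:
--                 # partner is to the left of r, so if it's in window, push min_l
--                 min_l = max(min_l, partner + 1)
--         count += r - min_l + 1
--
--     return count
-- ===== SOURCE B (Python) =====
-- def bioHazard(n, allergic, poisonous):
--     # Event/segment algorithm: aggregate each conflicting pair into a single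
--     # constraint "right endpoints >= hi force left >= lo+1", sort the constraint
--     # points, and count the intervals of each constraint-free stretch in closed
--     # form (arithmetic series) instead of walking every r from 1 to n.
--     best = {}
--     for a, p in zip(allergic, poisonous):
--         lo, hi = (a, p) if a < p else (p, a)
--         if lo < hi and 1 <= hi <= n:
--             if lo + 1 > best.get(hi, 0):
--                 best[hi] = lo + 1
--
--     def seg(a, b, L):
--         # sum_{r=a}^{b} (r - L + 1), closed form; 0 when the stretch is empty
--         if b < a:
--             return 0
--         return (a - L + 1 + (b - L + 1)) * (b - a + 1) // 2
--
--     count = 0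
--     min_l = 1
--     prev = 0
--     for hi in sorted(best):
--         count += seg(prev + 1, hi - 1, min_l)
--         if best[hi] > min_l:
--             min_l = best[hi]
--         count += hi - min_l + 1
--         prev = hi
--     return count + seg(prev + 1, n, min_l)
-- ===== Notes on version B (the rewrite author's own statement) =====
-- stated objective: faster
-- what changed: Replaces A's adjacency-list dict plus an O(n) sweep with an inner partner scan at every r by an event/segment algorithm: each pair is folded into one per-right-endpoint constraint, the constraint points are sorted, and the constraint-free stretches are counted in closed form (arithmetic series), so the work depends on the number of pairs, not on n.
import Mathlib
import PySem

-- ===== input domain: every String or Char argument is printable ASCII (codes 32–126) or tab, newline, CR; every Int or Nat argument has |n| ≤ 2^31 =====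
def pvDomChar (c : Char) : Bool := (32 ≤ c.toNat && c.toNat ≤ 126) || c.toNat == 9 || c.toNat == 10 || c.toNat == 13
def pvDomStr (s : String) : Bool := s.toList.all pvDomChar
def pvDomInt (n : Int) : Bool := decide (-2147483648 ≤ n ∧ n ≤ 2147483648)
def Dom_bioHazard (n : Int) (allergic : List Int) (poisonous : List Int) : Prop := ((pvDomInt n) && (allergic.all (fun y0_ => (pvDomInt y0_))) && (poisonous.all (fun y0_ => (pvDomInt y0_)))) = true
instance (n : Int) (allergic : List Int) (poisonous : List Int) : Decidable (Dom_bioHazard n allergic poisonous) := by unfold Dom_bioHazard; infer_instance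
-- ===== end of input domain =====

-- B replaces A's adjacency dict + O(n) sweep with sorted per-endpoint constraints and
-- closed-form (arithmetic-series) counting of the constraint-free stretches.

-- ===== PORT A =====
def bioHazard (n : Int) (allergic : List Int) (poisonous : List Int) : Int :=
  -- conflicts[p].append(a); conflicts[a].append(p)  (defaultdict(list) = Dict.modify with default [])
  let conflicts : PySem.Dict Int (List Int) :=
    (allergic.zip poisonous).foldl
      (fun d ap => (d.modify ap.2 [] (· ++ [ap.1])).modify ap.1 [] (· ++ [ap.2]))
      PySem.Dict.empty
  -- for r in range(1, n+1): for partner in conflicts[r]: …; count += r - min_l + 1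
  let res :=
    (PySem.List.pyRange 1 (n + 1) 1).foldl
      (fun (s : Int × Int) r =>
        let ml := (conflicts.getD r []).foldl
          (fun ml partner => if partner < r then max ml (partner + 1) else ml) s.2
        (s.1 + (r - ml + 1), ml))
      (0, 1)
  res.1

-- ===== PORT B =====
-- seg(a, b, L) = sum_{r=a}^{b} (r - L + 1) in closed form (Source B's helper `seg`)
def pvSeg (a b L : Int) : Int :=
  if b < a then 0
  else PySem.Int.floordiv ((a - L + 1 + (b - L + 1)) * (b - a + 1)) 2

def bioHazard_alt (n : Int) (allergic : List Int) (poisonous : List Int) : Int :=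
  -- best[hi] = max over pairs of lo+1 (stored only when it beats what is there)
  let best : PySem.Dict Int Int :=
    (allergic.zip poisonous).foldl
      (fun d ap =>
        let lo := if ap.1 < ap.2 then ap.1 else ap.2
        let hi := if ap.1 < ap.2 then ap.2 else ap.1
        if lo < hi ∧ 1 ≤ hi ∧ hi ≤ n then
          (if lo + 1 > d.getD hi 0 then d.insert hi (lo + 1) else d)
        else d)
      PySem.Dict.empty
  -- for hi in sorted(best): closed-form stretch, then the constraint point itself
  let res :=
    (PySem.List.sorted best.keys (fun x => x) false).foldl
      (fun (s : Int × Int × Int) hi =>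
        let c1 := s.1 + pvSeg (s.2.2 + 1) (hi - 1) s.2.1
        let ml := if best.getD hi 0 > s.2.1 then best.getD hi 0 else s.2.1
        (c1 + (hi - ml + 1), ml, hi))
      (0, 1, 0)
  res.1 + pvSeg (res.2.2 + 1) n res.2.1

-- ===== PRECONDITION & SPEC =====
def Spec_bioHazard (n : Int) (allergic : List Int) (poisonous : List Int) (out : Int) : Prop := out = bioHazard_alt n allergic poisonous
instance (n : Int) (allergic : List Int) (poisonous : List Int) (out : Int) : Decidable (Spec_bioHazard n allergic poisonous out) := by unfold Spec_bioHazard; infer_instance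

-- ===== CLAIM (what is proved, stated in full; the proofs are below) =====
def Claim_equal_bioHazard : Prop := ∀ (n : Int) (allergic : List Int) (poisonous : List Int), Dom_bioHazard n allergic poisonous → Spec_bioHazard n allergic poisonous (bioHazard n allergic poisonous)

-- ===== LEMMAS AND PROOFS =====

-- A's inner-loop step at right endpoint r.
def pvStep (r : Int) (ml partner : Int) : Int := if partner < r then max ml (partner + 1) else ml

-- One pair's contribution to the bound at right endpoint r, as a max-fold step.
def pvG (n r : Int) (m : Int) (ap : Int × Int) : Int :=
  if (if ap.1 < ap.2 then ap.1 else ap.2) < (if ap.1 < ap.2 then ap.2 else ap.1) ∧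
     1 ≤ (if ap.1 < ap.2 then ap.2 else ap.1) ∧ (if ap.1 < ap.2 then ap.2 else ap.1) ≤ n ∧
     (if ap.1 < ap.2 then ap.2 else ap.1) = r
  then max m ((if ap.1 < ap.2 then ap.1 else ap.2) + 1) else m

-- A's conflicts[r] as a flat list of partners in insertion order.
def pvPartners (r : Int) (pairs : List (Int × Int)) : List Int :=
  pairs.flatMap (fun ap => (if ap.2 = r then [ap.1] else []) ++ (if ap.1 = r then [ap.2] else []))

-- the bound B stores for endpoint r (0 when no pair constrains r)
def pvBnd (n r : Int) (pairs : List (Int × Int)) : Int := pairs.foldl (pvG n r) 0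

-- the canonical sweep step both programs are reduced to
def pvAStep (g : Int → Int) (s : Int × Int) (r : Int) : Int × Int :=
  let ml := max s.2 (max 1 (g r))
  (s.1 + (r - ml + 1), ml)

theorem pvA1 (r : Int) (pairs : List (Int × Int)) (d : PySem.Dict Int (List Int)) :
    ((pairs.foldl (fun d ap => (d.modify ap.2 [] (· ++ [ap.1])).modify ap.1 [] (· ++ [ap.2])) d).getD r [])
      = d.getD r [] ++ pvPartners r pairs := by
  induction pairs generalizing d with
  | nil => simp [pvPartners]
  | cons ap rest ih =>
    simp only [List.foldl_cons, ih, pvPartners, List.flatMap_cons]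
    rw [PySem.Dict.getD_modify]
    by_cases h1 : r = ap.1 <;> by_cases h2 : r = ap.2
    · rw [if_pos h1, PySem.Dict.getD_modify, if_pos (h1.symm.trans h2), if_pos h2.symm,
        if_pos h1.symm, h2]
      simp
    · rw [if_pos h1, PySem.Dict.getD_modify, if_neg (fun h => h2 (h1.trans h)),
        if_neg (fun h => h2 h.symm), if_pos h1.symm, h1]
      simp
    · rw [if_neg h1, PySem.Dict.getD_modify, if_pos h2, if_pos h2.symm,
        if_neg (fun h => h1 h.symm), h2]
      simp
    · rw [if_neg h1, PySem.Dict.getD_modify, if_neg h2, if_neg (fun h => h2 h.symm),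
        if_neg (fun h => h1 h.symm)]
      simp

-- B's build loop read back at r is the max-fold pvBnd.
theorem pvB1 (n r : Int) (pairs : List (Int × Int)) (d : PySem.Dict Int Int) :
    ((pairs.foldl (fun d ap =>
        let lo := if ap.1 < ap.2 then ap.1 else ap.2
        let hi := if ap.1 < ap.2 then ap.2 else ap.1
        if lo < hi ∧ 1 ≤ hi ∧ hi ≤ n then
          (if lo + 1 > d.getD hi 0 then d.insert hi (lo + 1) else d)
        else d) d).getD r 0)
      = pairs.foldl (pvG n r) (d.getD r 0) := by
  induction pairs generalizing d with
  | nil => rfl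
  | cons ap rest ih =>
    simp only [List.foldl_cons, ih]
    congr 1
    show _ = pvG n r (d.getD r 0) ap
    unfold pvG
    by_cases hlt : ap.1 < ap.2
    · simp only [if_pos hlt]
      by_cases hr : ap.2 = r
      · subst hr
        split_ifs with hA hB <;>
          first
            | omega
            | (rw [PySem.Dict.getD_insert, if_pos rfl]; omega)
      · split_ifs with hA hB <;>
          first
            | rfl
            | omega
            | (rw [PySem.Dict.getD_insert, if_neg (fun h => hr h.symm)])
    · simp only [if_neg hlt]
      by_cases hr : ap.1 = r
      · subst hr
        split_ifs with hA hB <;>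
          first
            | omega
            | (rw [PySem.Dict.getD_insert, if_pos rfl]; omega)
      · split_ifs with hA hB <;>
          first
            | rfl
            | omega
            | (rw [PySem.Dict.getD_insert, if_neg (fun h => hr h.symm)])

-- every key of B's dict lies in [1, n]
theorem pvKeysRange (n : Int) (pairs : List (Int × Int)) (d : PySem.Dict Int Int) :
    ∀ k ∈ (pairs.foldl (fun d ap =>
        let lo := if ap.1 < ap.2 then ap.1 else ap.2
        let hi := if ap.1 < ap.2 then ap.2 else ap.1
        if lo < hi ∧ 1 ≤ hi ∧ hi ≤ n then
          (if lo + 1 > d.getD hi 0 then d.insert hi (lo + 1) else d)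
        else d) d).keys,
      k ∈ d.keys ∨ (1 ≤ k ∧ k ≤ n) := by
  induction pairs generalizing d with
  | nil => exact fun k hk => Or.inl hk
  | cons ap rest ih =>
    intro k hk
    simp only [List.foldl_cons] at hk
    rcases ih _ k hk with h | h
    · split_ifs at h <;>
        first
          | exact Or.inl h
          | (rcases (PySem.Dict.mem_keys_insert _ _ _ _).1 h with rfl | h4
             exacts [Or.inr ⟨by omega, by omega⟩, Or.inl h4])
    · exact Or.inr h

-- B's dict has Nodup keys
theorem pvKeysNodup (n : Int) (pairs : List (Int × Int)) (d : PySem.Dict Int Int)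
    (hd : d.keys.Nodup) :
    (pairs.foldl (fun d ap =>
        let lo := if ap.1 < ap.2 then ap.1 else ap.2
        let hi := if ap.1 < ap.2 then ap.2 else ap.1
        if lo < hi ∧ 1 ≤ hi ∧ hi ≤ n then
          (if lo + 1 > d.getD hi 0 then d.insert hi (lo + 1) else d)
        else d) d).keys.Nodup := by
  induction pairs generalizing d with
  | nil => exact hd
  | cons ap rest ih =>
    simp only [List.foldl_cons]
    apply ih
    split_ifs <;> first | exact hd | exact PySem.Dict.nodup_keys_insert _ _ _ hd

theorem pvStep_max (r : Int) (l : List Int) (a b : Int) :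
    l.foldl (pvStep r) (max a b) = max a (l.foldl (pvStep r) b) := by
  induction l generalizing b with
  | nil => rfl
  | cons q t ih =>
    simp only [List.foldl_cons]
    have h : pvStep r (max a b) q = max a (pvStep r b q) := by
      unfold pvStep; split_ifs <;> omega
    rw [h, ih]

theorem pvG_max (n r : Int) (l : List (Int × Int)) (a b : Int) :
    l.foldl (pvG n r) (max a b) = max a (l.foldl (pvG n r) b) := by
  induction l generalizing b with
  | nil => rfl
  | cons q t ih =>
    simp only [List.foldl_cons]
    have h : pvG n r (max a b) q = max a (pvG n r b q) := by
      unfold pvG; split_ifs <;> omega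
    rw [h, ih]

theorem pvCore (n r : Int) (hr : 1 ≤ r ∧ r ≤ n) (pairs : List (Int × Int)) :
    (pvPartners r pairs).foldl (pvStep r) 1 = pairs.foldl (pvG n r) 1 := by
  induction pairs with
  | nil => rfl
  | cons ap rest ih =>
    have hexp : pvPartners r (ap :: rest)
        = ((if ap.2 = r then [ap.1] else []) ++ (if ap.1 = r then [ap.2] else [])) ++ pvPartners r rest := by
      simp [pvPartners]
    have hpref : ((if ap.2 = r then [ap.1] else []) ++ (if ap.1 = r then [ap.2] else [])).foldl (pvStep r) 1
        = pvG n r 1 ap := by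
      unfold pvG
      by_cases h1 : ap.1 = r <;> by_cases h2 : ap.2 = r <;>
        simp [h1, h2, pvStep] <;> split_ifs <;> omega
    rw [hexp, List.foldl_append, hpref, List.foldl_cons]
    have hg1 : (1:Int) ≤ pvG n r 1 ap := by unfold pvG; split_ifs <;> omega
    have e : pvG n r 1 ap = max (pvG n r 1 ap) 1 := by omega
    rw [e, pvStep_max, pvG_max, ih]

-- exact halving
theorem pvFdiv2 (k : Int) : PySem.Int.floordiv (2 * k) 2 = k := by
  rw [PySem.Int.floordiv_eq_ediv_of_pos (by norm_num)]
  exact Int.mul_ediv_cancel_left k (by norm_num)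

-- peel the first term of the arithmetic series
theorem pvSeg_cons (a b L : Int) (h : a ≤ b) :
    pvSeg a b L = (a - L + 1) + pvSeg (a + 1) b L := by
  rcases eq_or_lt_of_le h with rfl | hlt
  · unfold pvSeg
    rw [if_neg (by omega), if_pos (by omega)]
    have : (a - L + 1 + (a - L + 1)) * (a - a + 1) = 2 * (a - L + 1) := by ring
    rw [this, pvFdiv2]
    ring
  · unfold pvSeg
    rw [if_neg (by omega), if_neg (by omega)]
    rcases Int.even_or_odd (a + b) with ⟨m, hm⟩ | ⟨m, hm⟩
    · have e1 : (a - L + 1 + (b - L + 1)) * (b - a + 1) = 2 * ((m - L + 1) * (b - a + 1)) := by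
        linear_combination (b - a + 1) * hm
      have e2 : (a + 1 - L + 1 + (b - L + 1)) * (b - (a + 1) + 1)
          = 2 * ((a + b - 2 * L + 3) * (m - a)) := by
        linear_combination (a + b - 2 * L + 3) * hm
      rw [e1, e2, pvFdiv2, pvFdiv2]
      have hb : b = m + m - a := by omega
      subst hb; ring
    · have e1 : (a - L + 1 + (b - L + 1)) * (b - a + 1)
          = 2 * ((a + b - 2 * L + 2) * (m - a + 1)) := by
        linear_combination (a + b - 2 * L + 2) * hm
      have e2 : (a + 1 - L + 1 + (b - L + 1)) * (b - (a + 1) + 1)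
          = 2 * ((m - L + 2) * (b - a)) := by
        linear_combination (b - a) * hm
      rw [e1, e2, pvFdiv2, pvFdiv2]
      have hb : b = 2 * m + 1 - a := by omega
      subst hb; ring

-- a constraint-free stretch sums in closed form and leaves min_l untouched
theorem pvFlat (g : Int → Int) (e : Int) : ∀ (a c ml : Int), 1 ≤ ml →
    (∀ r, a ≤ r → r < e → g r ≤ 0) →
    (PySem.List.pyRange a e 1).foldl (pvAStep g) (c, ml) = (c + pvSeg a (e - 1) ml, ml) := by
  intro a
  by_cases he : e ≤ a
  · intro c ml hml _
    rw [PySem.List.pyRange_one_eq_nil he]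
    simp only [List.foldl_nil, pvSeg]
    rw [if_pos (show e - 1 < a by omega)]
    norm_num
  · intro c ml hml hg
    replace he : a < e := by omega
    rw [PySem.List.pyRange_one_cons he, List.foldl_cons]
    have hga : g a ≤ 0 := hg a le_rfl he
    have hstep : pvAStep g (c, ml) a = (c + (a - ml + 1), ml) := by
      unfold pvAStep
      have : max ml (max 1 (g a)) = ml := by omega
      simp only [this]
    rw [hstep, pvFlat g e (a + 1) (c + (a - ml + 1)) ml hml
      (fun r hr1 hr2 => hg r (by omega) hr2)]
    rw [pvSeg_cons a (e - 1) ml (by omega)]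
    simp only [Prod.mk.injEq]
    exact ⟨by ring, trivial⟩
  termination_by a => (e - a).toNat
  decreasing_by omega

-- main sweep: A's flat walk over 1..n equals B's walk over the sorted constraint points
theorem pvSweep (g : Int → Int) (n : Int) (K : List Int) :
    ∀ (prev c ml : Int), 1 ≤ ml →
    K.Pairwise (· < ·) →
    (∀ k ∈ K, prev < k ∧ k ≤ n) →
    (∀ r, prev < r → r ≤ n → r ∉ K → g r ≤ 0) →
    ((PySem.List.pyRange (prev + 1) (n + 1) 1).foldl (pvAStep g) (c, ml)).1
      = (let t := K.foldl
            (fun (s : Int × Int × Int) hi =>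
              let c1 := s.1 + pvSeg (s.2.2 + 1) (hi - 1) s.2.1
              let ml := if g hi > s.2.1 then g hi else s.2.1
              (c1 + (hi - ml + 1), ml, hi))
            (c, ml, prev)
         ; t.1 + pvSeg (t.2.2 + 1) n t.2.1) := by
  induction K with
  | nil =>
    intro prev c ml hml _ _ hmiss
    rw [pvFlat g (n + 1) (prev + 1) c ml hml
      (fun r hr1 hr2 => hmiss r (by omega) (by omega) (List.not_mem_nil))]
    simp only [List.foldl_nil]
    norm_num
  | cons k K' ih =>
    intro prev c ml hml hpw hK hmiss
    have hk := hK k (List.mem_cons_self ..)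
    have hK' : ∀ x ∈ K', k < x := fun x hx => (List.pairwise_cons.1 hpw).1 x hx
    -- split the range at k
    rw [PySem.List.pyRange_one_append (prev + 1) k (n + 1) (by omega) (by omega),
      List.foldl_append]
    -- flat stretch prev+1 .. k-1
    rw [pvFlat g k (prev + 1) c ml hml
      (fun r hr1 hr2 => hmiss r (by omega) (by omega)
        (by
          intro hmem
          rcases List.mem_cons.1 hmem with rfl | hmem'
          · omega
          · exact absurd (hK' r hmem') (by omega)))]
    -- the constraint point k itself
    rw [PySem.List.pyRange_one_cons (by omega : k < n + 1), List.foldl_cons]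
    have hstep : pvAStep g (c + pvSeg (prev + 1) (k - 1) ml, ml) k
        = (c + pvSeg (prev + 1) (k - 1) ml + (k - max ml (g k) + 1), max ml (g k)) := by
      unfold pvAStep
      have : max ml (max 1 (g k)) = max ml (g k) := by omega
      simp only [this]
    rw [hstep]
    have hml' : 1 ≤ max ml (g k) := by omega
    rw [ih k (c + pvSeg (prev + 1) (k - 1) ml + (k - max ml (g k) + 1)) (max ml (g k)) hml'
      (List.pairwise_cons.1 hpw).2
      (fun x hx => ⟨hK' x hx, (hK x (List.mem_cons_of_mem _ hx)).2⟩)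
      (fun r hr1 hr2 hr3 => hmiss r (by omega) hr2
        (by intro hmem; rcases List.mem_cons.1 hmem with rfl | hmem' <;> [omega; exact hr3 hmem']))]
    simp only [List.foldl_cons]
    have hif : (if g k > ml then g k else ml) = max ml (g k) := by omega
    rw [hif]

-- A's sweep, rewritten to the canonical step (min_l stays ≥ 1 throughout)
theorem pvAeq (n : Int) (pairs : List (Int × Int)) (conf : PySem.Dict Int (List Int))
    (hconf : ∀ r, conf.getD r [] = pvPartners r pairs) :
    ∀ (l : List Int), (∀ r ∈ l, 1 ≤ r ∧ r ≤ n) → ∀ (c ml : Int), 1 ≤ ml →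
    l.foldl (fun (s : Int × Int) r =>
        let m := (conf.getD r []).foldl
          (fun ml partner => if partner < r then max ml (partner + 1) else ml) s.2
        (s.1 + (r - m + 1), m)) (c, ml)
      = l.foldl (pvAStep (fun r => pvBnd n r pairs)) (c, ml) := by
  intro l
  induction l with
  | nil => intro _ c ml _; rfl
  | cons r t ih =>
    intro hl c ml hml
    have hr := hl r (List.mem_cons_self ..)
    have hm : (conf.getD r []).foldl
        (fun ml partner => if partner < r then max ml (partner + 1) else ml) ml
        = max ml (max 1 (pvBnd n r pairs)) := by
      rw [hconf r]
      have e : ml = max ml 1 := by omega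
      calc (pvPartners r pairs).foldl (fun ml partner => if partner < r then max ml (partner + 1) else ml) ml
          = (pvPartners r pairs).foldl (pvStep r) (max ml 1) := by rw [← e]; rfl
        _ = max ml ((pvPartners r pairs).foldl (pvStep r) 1) := pvStep_max ..
        _ = max ml (pairs.foldl (pvG n r) 1) := by rw [pvCore n r hr pairs]
        _ = max ml (max 1 (pairs.foldl (pvG n r) 0)) := by
            have h10 := pvG_max n r pairs 1 0
            norm_num at h10
            rw [h10]
        _ = max ml (max 1 (pvBnd n r pairs)) := rfl
    simp only [List.foldl_cons, hm]
    have hstep : pvAStep (fun r => pvBnd n r pairs) (c, ml) r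
        = (c + (r - max ml (max 1 (pvBnd n r pairs)) + 1), max ml (max 1 (pvBnd n r pairs))) := rfl
    rw [hstep]
    exact ih (fun x hx => hl x (List.mem_cons_of_mem _ hx)) _ _ (by omega)

-- ===== VERDICT (by name: the statement is the Claim_ definition above) =====
theorem bioHazard_spec : Claim_equal_bioHazard := by
  intro n allergic poisonous _
  unfold Spec_bioHazard bioHazard bioHazard_alt
  simp only []
  set pairs := allergic.zip poisonous with hpairs
  set best := pairs.foldl
      (fun d ap =>
        let lo := if ap.1 < ap.2 then ap.1 else ap.2
        let hi := if ap.1 < ap.2 then ap.2 else ap.1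
        if lo < hi ∧ 1 ≤ hi ∧ hi ≤ n then
          (if lo + 1 > d.getD hi 0 then d.insert hi (lo + 1) else d)
        else d)
      PySem.Dict.empty with hbest
  have hbnd : ∀ r, best.getD r 0 = pvBnd n r pairs := by
    intro r
    rw [hbest, pvB1 n r pairs PySem.Dict.empty]
    simp [pvBnd]
  -- A's fold is the canonical sweep with g = pvBnd
  have hA : ((PySem.List.pyRange 1 (n + 1) 1).foldl
      (fun (s : Int × Int) r =>
        let ml := (((allergic.zip poisonous).foldl
            (fun d ap => (d.modify ap.2 [] (· ++ [ap.1])).modify ap.1 [] (· ++ [ap.2]))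
            PySem.Dict.empty).getD r []).foldl
          (fun ml partner => if partner < r then max ml (partner + 1) else ml) s.2
        (s.1 + (r - ml + 1), ml))
      (0, 1))
      = (PySem.List.pyRange 1 (n + 1) 1).foldl (pvAStep (fun r => pvBnd n r pairs)) (0, 1) := by
    apply pvAeq n pairs
    · intro r
      rw [pvA1]
      simp [hpairs]
    · intro r hr
      have hr' := (PySem.List.mem_pyRange_one (a := 1) (b := n + 1) (x := r)).1 hr
      omega
    · norm_num
  rw [hA]
  -- B's fold over the sorted keys, with getD rewritten to pvBnd
  set K := PySem.List.sorted best.keys (fun x => x) false with hK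
  have hBfold : K.foldl
      (fun (s : Int × Int × Int) hi =>
        let c1 := s.1 + pvSeg (s.2.2 + 1) (hi - 1) s.2.1
        let ml := if best.getD hi 0 > s.2.1 then best.getD hi 0 else s.2.1
        (c1 + (hi - ml + 1), ml, hi))
      (0, 1, 0)
      = K.foldl
      (fun (s : Int × Int × Int) hi =>
        let c1 := s.1 + pvSeg (s.2.2 + 1) (hi - 1) s.2.1
        let ml := if pvBnd n hi pairs > s.2.1 then pvBnd n hi pairs else s.2.1
        (c1 + (hi - ml + 1), ml, hi))
      (0, 1, 0) := by
    apply PySem.List.foldl_congr_mem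
    intro s hi _
    rw [hbnd hi]
  rw [hBfold]
  -- properties of K
  have hnodupKeys : best.keys.Nodup := by
    rw [hbest]
    exact pvKeysNodup n pairs PySem.Dict.empty (by simp)
  have hnodupK : K.Nodup := (PySem.List.sorted_perm best.keys (fun x => x) false).nodup_iff.2 hnodupKeys
  have hpwK : K.Pairwise (· < ·) := by
    have hle : K.Pairwise (fun a b => a ≤ b) := PySem.List.sorted_pairwise best.keys (fun x => x)
    exact (hle.and hnodupK).imp (fun h => lt_of_le_of_ne h.1 h.2)
  have hmemK : ∀ k, k ∈ K ↔ k ∈ best.keys := fun k => PySem.List.mem_sorted ..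
  have hrangeK : ∀ k ∈ K, 0 < k ∧ k ≤ n := by
    intro k hk
    rcases pvKeysRange n pairs PySem.Dict.empty k (by rw [← hbest]; exact (hmemK k).1 hk) with h | h
    · simp [PySem.Dict.keys_empty] at h
    · exact ⟨by omega, h.2⟩
  have hmiss : ∀ r, 0 < r → r ≤ n → r ∉ K → pvBnd n r pairs ≤ 0 := by
    intro r _ _ hr
    have hnc : best.contains r = false := by
      by_contra h
      have hc : best.contains r = true := by
        cases hcb : best.contains r
        · exact absurd hcb h
        · rfl
      exact hr ((hmemK r).2 ((PySem.Dict.contains_iff_mem_keys _ _).1 hc))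
    have := PySem.Dict.getD_of_not_contains (d := best) (k := r) (d0 := (0 : Int)) hnc
    rw [hbnd r] at this
    omega
  have := pvSweep (fun r => pvBnd n r pairs) n K 0 0 1 (by norm_num) hpwK hrangeK hmiss
  simpa using this
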